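-- pv_equiv track=rewrite | github.com/info-wordcab/clark-voice | tests/test_transcript_buffering.py | check_garbled
-- ===== SOURCE A (Python) =====
-- def check_garbled(content: str) -> bool:
--     """Check if content appears garbled (duplicated words, interleaving)."""
--     words = content.split()
--     # Check for immediate duplicates
--     for i in range(len(words) - 1):
--         if words[i].lower().strip(".,!?") == words[i + 1].lower().strip(".,!?"):
--             return True
--     # Check for repeated subsequences
--     word_counts = {}
--     for w in words:
--         clean = w.lower().strip(".,!?")
--         word_counts[clean] = word_counts.get(clean, 0) + 1
--     # If any content word appears more than once, likely garbled
--     for word, count in word_counts.items():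
--         if count > 1 and word not in ["a", "the", "to", "and", "i", "you", "me"]:
--             return True
--     return False
-- ===== SOURCE B (Python) =====
-- def check_garbled(content: str) -> bool:
--     prev = None
--     seen = set()
--     stop = {"a", "the", "to", "and", "i", "you", "me"}
--     for w in content.split():
--         clean = w.lower().strip(".,!?")
--         if prev is not None and clean == prev:
--             return True
--         if clean in seen and clean not in stop:
--             return True
--         seen.add(clean)
--         prev = clean
--     return False
-- ===== Notes on version B (the rewrite author's own statement) =====
-- stated objective: simpler
-- what changed: Fuses A's three passes (adjacent-pair scan, count-dict build, dict-items scan) into one loop over the words that keeps the previous cleaned word and a set of words seen so far, returning at the first adjacent duplicate or repeated non-stopword.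
import Mathlib
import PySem

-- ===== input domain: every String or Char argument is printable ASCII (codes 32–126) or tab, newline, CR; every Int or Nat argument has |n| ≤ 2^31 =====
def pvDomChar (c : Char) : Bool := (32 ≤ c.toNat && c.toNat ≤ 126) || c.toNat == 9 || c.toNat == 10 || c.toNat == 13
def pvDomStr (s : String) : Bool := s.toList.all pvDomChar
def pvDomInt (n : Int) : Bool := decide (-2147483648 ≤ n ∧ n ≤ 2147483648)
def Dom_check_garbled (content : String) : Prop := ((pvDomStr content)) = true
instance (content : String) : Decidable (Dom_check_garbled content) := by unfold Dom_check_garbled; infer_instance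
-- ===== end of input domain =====

-- B fuses A's three passes (adjacent scan, count-dict build, items scan) into one loop
-- keeping the previous cleaned word and a set of cleaned words seen so far (objective: simpler).


-- ===== PORT A =====
-- w.lower().strip(".,!?")  (this expression appears verbatim in both Pythons)
def pvClean (w : String) : String := PySem.Str.stripChars (PySem.Str.lower w) ".,!?"

-- the stopword list ["a", "the", "to", "and", "i", "you", "me"] (identical in both Pythons)
def pvStop : List String := ["a", "the", "to", "and", "i", "you", "me"]

-- A's first loop: 'for i in range(len(words)-1): if words[i]…== words[i+1]…: return True'
-- (the index loop over adjacent positions, as the structural recursion on adjacent pairs)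
def aAdjLoop : List String → Bool
  | w1 :: w2 :: rest => if pvClean w1 == pvClean w2 then true else aAdjLoop (w2 :: rest)
  | _ => false

def check_garbled (content : String) : Bool :=
  let words := PySem.Str.split₀ content
  if aAdjLoop words then true
  else
    let word_counts := words.foldl
      (fun d w => let clean := pvClean w; d.insert clean (d.getD clean 0 + 1))
      (PySem.Dict.empty : PySem.Dict String Int)
    word_counts.items.any (fun p => decide (1 < p.2) && !(pvStop.contains p.1))

-- ===== PORT B =====
-- B's single loop: prev = previous cleaned word, seen = set of cleaned words so far
def bLoop : Option String → PySem.Set String → List String → Bool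
  | _, _, [] => false
  | prev, seen, w :: rest =>
    let clean := pvClean w
    if prev == some clean then true
    else if PySem.Set.contains seen clean && !(pvStop.contains clean) then true
    else bLoop (some clean) (PySem.Set.add seen clean) rest

def check_garbled_alt (content : String) : Bool :=
  bLoop none PySem.Set.empty (PySem.Str.split₀ content)

-- ===== PRECONDITION & SPEC =====
def Spec_check_garbled (content : String) (out : Bool) : Prop := out = check_garbled_alt content
instance (content : String) (out : Bool) : Decidable (Spec_check_garbled content out) := by unfold Spec_check_garbled; infer_instance

-- ===== CLAIM (what is proved, stated in full; the proofs are below) =====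
def Claim_equal_check_garbled : Prop := ∀ (content : String), Dom_check_garbled content → Spec_check_garbled content (check_garbled content)

-- ===== LEMMAS AND PROOFS =====

-- proof-side decomposition of B's fused loop: the adjacent-duplicate part …
def adjP : Option String → List String → Bool
  | _, [] => false
  | prev, c :: rest => prev == some c || adjP (some c) rest

-- … and the repeated-non-stopword part, both over the already-cleaned words
def dupP : PySem.Set String → List String → Bool
  | _, [] => false
  | seen, c :: rest =>
    (PySem.Set.contains seen c && !(pvStop.contains c)) || dupP (PySem.Set.add seen c) rest

theorem bLoop_eq_adjP_or_dupP (ws : List String) :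
    ∀ (prev : Option String) (seen : PySem.Set String),
    bLoop prev seen ws = (adjP prev (ws.map pvClean) || dupP seen (ws.map pvClean)) := by
  induction ws with
  | nil => intro prev seen; rfl
  | cons w rest ih =>
    intro prev seen
    simp only [bLoop, List.map_cons, adjP, dupP, ih]
    by_cases h1 : prev == some (pvClean w)
    · simp [h1]
    · simp only [h1, Bool.false_or]
      simp [Bool.or_left_comm]

theorem aAdjLoop_eq_adjP (ws : List String) (w : String) :
    aAdjLoop (w :: ws) = adjP (some (pvClean w)) (ws.map pvClean) := by
  induction ws generalizing w with
  | nil => rfl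
  | cons w2 rest ih =>
    simp only [aAdjLoop, List.map_cons, adjP, ih]
    by_cases h : pvClean w == pvClean w2
    · simp_all
    · simp_all

-- A's count dict is Counter over the cleaned words
theorem aCount_eq (ws : List String) :
    List.foldl (fun (d : PySem.Dict String Int) w =>
        let clean := pvClean w; d.insert clean (d.getD clean 0 + 1))
      PySem.Dict.empty ws
      = PySem.Dict.counter (ws.map pvClean) := by
  rw [← PySem.Dict.foldl_insert_getD_add_one_eq_counter]
  show List.foldl (fun (d : PySem.Dict String Int) w =>
      d.insert (pvClean w) (d.getD (pvClean w) 0 + 1)) PySem.Dict.empty ws = _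
  exact (List.foldl_map (f := pvClean)
    (g := fun (d : PySem.Dict String Int) c => d.insert c (d.getD c 0 + 1))
    (l := ws) (init := PySem.Dict.empty)).symm

theorem dupP_iff (cs : List String) : ∀ (seen : PySem.Set String),
    dupP seen cs = true ↔
      ∃ c, c ∉ pvStop ∧ ((c ∈ seen ∧ c ∈ cs) ∨ 2 ≤ cs.count c) := by
  induction cs with
  | nil => intro seen; simp [dupP]
  | cons c rest ih =>
    intro seen
    simp only [dupP, Bool.or_eq_true, Bool.and_eq_true, ih, PySem.Set.contains_iff,
      Bool.not_eq_eq_eq_not, Bool.not_true, List.contains_eq_mem, decide_eq_false_iff_not]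
    constructor
    · rintro (⟨hc, hns⟩ | ⟨x, hxs, hx⟩)
      · exact ⟨c, hns, Or.inl ⟨hc, List.mem_cons_self⟩⟩
      · refine ⟨x, hxs, ?_⟩
        rcases hx with ⟨hmem, hrest⟩ | hcnt
        · rcases (PySem.Set.mem_add _ _ _).1 hmem with hseen | hxc
          · exact Or.inl ⟨hseen, List.mem_cons_of_mem _ hrest⟩
          · subst hxc
            right
            rw [List.count_cons_self]
            have : 1 ≤ rest.count x := List.one_le_count_iff.2 hrest
            omega
        · exact Or.inr (hcnt.trans List.count_le_count_cons)
    · rintro ⟨x, hxs, hx⟩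
      rcases hx with ⟨hseen, hmem⟩ | hcnt
      · rcases List.mem_cons.1 hmem with hxc | hrest
        · subst hxc; exact Or.inl ⟨hseen, hxs⟩
        · exact Or.inr ⟨x, hxs, Or.inl ⟨(PySem.Set.mem_add _ _ _).2 (Or.inl hseen), hrest⟩⟩
      · by_cases hxc : x = c
        · subst hxc
          rw [List.count_cons_self] at hcnt
          have hx1 : x ∈ rest := List.one_le_count_iff.1 (by omega)
          exact Or.inr ⟨x, hxs, Or.inl ⟨(PySem.Set.mem_add _ _ _).2 (Or.inr rfl), hx1⟩⟩
        · refine Or.inr ⟨x, hxs, Or.inr ?_⟩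
          rwa [List.count_cons_of_ne (Ne.symm hxc)] at hcnt

-- A's third loop over Counter items detects exactly a repeated non-stopword
theorem aDup_iff (cs : List String) :
    ((PySem.Set.ofList cs).map (fun k => (k, (cs.count k : Int)))).any
        (fun p => decide (1 < p.2) && !(pvStop.contains p.1)) = true ↔
      ∃ c, c ∉ pvStop ∧ 2 ≤ cs.count c := by
  simp only [List.any_map, List.any_eq_true, Function.comp, Bool.and_eq_true,
    decide_eq_true_eq, Bool.not_eq_eq_eq_not, Bool.not_true, List.contains_eq_mem,
    decide_eq_false_iff_not, PySem.Set.mem_ofList]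
  constructor
  · rintro ⟨c, _, hcnt, hns⟩
    exact ⟨c, hns, by exact_mod_cast hcnt⟩
  · rintro ⟨c, hns, hcnt⟩
    refine ⟨c, List.one_le_count_iff.1 (by omega), by exact_mod_cast hcnt, hns⟩

-- ===== VERDICT (by name: the statement is the Claim_ definition above) =====
theorem check_garbled_spec : Claim_equal_check_garbled := by
  intro content _
  unfold Spec_check_garbled check_garbled check_garbled_alt
  set ws := PySem.Str.split₀ content with hws
  rw [Bool.eq_iff_iff]
  rw [bLoop_eq_adjP_or_dupP]
  have hadj : aAdjLoop ws = adjP none (ws.map pvClean) := by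
    cases ws with
    | nil => rfl
    | cons w rest =>
      simp only [List.map_cons, adjP, aAdjLoop_eq_adjP]
      simp
  cases h : aAdjLoop ws with
  | true =>
    simp only [h] at hadj ⊢
    simp [← hadj]
  | false =>
    simp only [h, Bool.false_eq_true, not_false_iff, if_neg]
    rw [aCount_eq, Bool.or_eq_true, ← hadj, h]
    simp only [Bool.false_eq_true, false_or]
    rw [PySem.Dict.items_counter]
    rw [aDup_iff, dupP_iff]
    constructor
    · rintro ⟨c, hns, hcnt⟩; exact ⟨c, hns, Or.inr hcnt⟩
    · rintro ⟨c, hns, hmem | hcnt⟩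
      · exact absurd hmem.1 (by simp [PySem.Set.empty])
      · exact ⟨c, hns, hcnt⟩
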